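-- pv_equiv track=rewrite | github.com/garywei944/ELBA | auto_pipeline_modules/run_elba.py | perlmutter_task_resources
-- ===== SOURCE A (Python) =====
-- def perlmutter_task_resources(num_procs, num_nodes):
--
--     proc_counts = [p**2 for p in range(1,12)] + [p**2 for p in range(1,512) if (p**2)%128==0]
--     node_counts = [max(P//128, 1) for P in proc_counts]
--
--     if num_nodes > 1:
--         for i in range(len(node_counts)):
--             if num_nodes <= node_counts[i]:
--                 break
--         return proc_counts[i], node_counts[i], 2
--     else:
--         for i in range(len(proc_counts)):
--             if num_procs <= proc_counts[i]:
--                 break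
--         return proc_counts[i], node_counts[i], max(256//proc_counts[i], 2)
-- ===== SOURCE B (Python) =====
-- def perlmutter_task_resources(num_procs, num_nodes):
--     # Same tables, written directly (squares divisible by 128 are exactly (16k)^2),
--     # but the linear scans are replaced by one hand-rolled binary search over the
--     # relevant sorted table; lo..hi clamped to the last index gives the same
--     # "largest config" fallback naturally.
--     proc_counts = [p * p for p in range(1, 12)] + [(16 * k) ** 2 for k in range(1, 32)]
--     node_counts = [max(P // 128, 1) for P in proc_counts]
--     if num_nodes > 1:
--         key, xs = num_nodes, node_counts
--     else:
--         key, xs = num_procs, proc_counts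
--     lo, hi = 0, len(xs) - 1
--     while lo < hi:
--         mid = (lo + hi) // 2
--         if xs[mid] < key:
--             lo = mid + 1
--         else:
--             hi = mid
--     if num_nodes > 1:
--         return proc_counts[lo], node_counts[lo], 2
--     return proc_counts[lo], node_counts[lo], max(256 // proc_counts[lo], 2)
-- ===== Notes on version B (the rewrite author's own statement) =====
-- stated objective: alternative
-- what changed: Both linear first-match scans over the resource tables are replaced by a single hand-rolled binary search (lo/hi halving, clamped to the last index) over the relevant sorted table.
import Mathlib
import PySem

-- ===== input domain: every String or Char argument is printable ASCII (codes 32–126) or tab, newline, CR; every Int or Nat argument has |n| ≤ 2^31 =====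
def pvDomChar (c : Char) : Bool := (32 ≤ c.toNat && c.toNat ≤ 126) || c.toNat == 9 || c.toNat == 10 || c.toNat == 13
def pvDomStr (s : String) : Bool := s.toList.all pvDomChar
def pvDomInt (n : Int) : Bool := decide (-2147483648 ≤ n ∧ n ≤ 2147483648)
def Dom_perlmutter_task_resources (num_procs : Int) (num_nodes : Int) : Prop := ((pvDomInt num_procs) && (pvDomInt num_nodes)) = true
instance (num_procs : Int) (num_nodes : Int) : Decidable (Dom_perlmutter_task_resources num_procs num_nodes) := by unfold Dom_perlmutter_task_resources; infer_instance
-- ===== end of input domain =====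

-- B replaces the two linear first-match scans over the fixed tables with one hand-rolled binary search (alternative decomposition; same tiny constant table, no speed claim).

-- ===== PORT A =====
-- A's 'for i in range(len(xs)): if key <= xs[i]: break': returns the break index,
-- or, when the loop falls through (list nonempty), the last index i = len - 1.
def pvFirstGeIdx (key : Int) : List Int → Nat → Nat
  | [], i => i - 1          -- loop ended without break: Python leaves i = last index
  | x :: rest, i => if key ≤ x then i else pvFirstGeIdx key rest (i + 1)

def perlmutter_task_resources (num_procs : Int) (num_nodes : Int) : Int × Int × Int :=
  let proc_counts : List Int :=
    ((PySem.List.pyRange 1 12 1).map (fun p => p ^ 2)) ++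
    (((PySem.List.pyRange 1 512 1).filter (fun p => PySem.Int.mod (p ^ 2) 128 == 0)).map (fun p => p ^ 2))
  let node_counts : List Int := proc_counts.map (fun P => max (PySem.Int.floordiv P 128) 1)
  if num_nodes > 1 then
    let i := pvFirstGeIdx num_nodes node_counts 0
    (proc_counts.getD i 0, node_counts.getD i 0, 2)   -- i always in range: tables nonempty
  else
    let i := pvFirstGeIdx num_procs proc_counts 0
    (proc_counts.getD i 0, node_counts.getD i 0, max (PySem.Int.floordiv 256 (proc_counts.getD i 0)) 2)

-- ===== PORT B =====
-- B's 'while lo < hi' binary search; terminates since hi - lo shrinks.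
-- (Python's 'mid' is written inline as (lo + hi) / 2.)
def pvBSearch (xs : List Int) (key : Int) (lo hi : Nat) : Nat :=
  if h : lo < hi then
    if xs.getD ((lo + hi) / 2) 0 < key then pvBSearch xs key ((lo + hi) / 2 + 1) hi
    else pvBSearch xs key lo ((lo + hi) / 2)
  else lo
termination_by hi - lo
decreasing_by all_goals omega

def perlmutter_task_resources_alt (num_procs : Int) (num_nodes : Int) : Int × Int × Int :=
  let proc_counts : List Int :=
    ((PySem.List.pyRange 1 12 1).map (fun p => p * p)) ++
    ((PySem.List.pyRange 1 32 1).map (fun k => (16 * k) ^ 2))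
  let node_counts : List Int := proc_counts.map (fun P => max (PySem.Int.floordiv P 128) 1)
  let kx : Int × List Int := if num_nodes > 1 then (num_nodes, node_counts) else (num_procs, proc_counts)
  let lo := pvBSearch kx.2 kx.1 0 (kx.2.length - 1)
  if num_nodes > 1 then
    (proc_counts.getD lo 0, node_counts.getD lo 0, 2)
  else
    (proc_counts.getD lo 0, node_counts.getD lo 0, max (PySem.Int.floordiv 256 (proc_counts.getD lo 0)) 2)

-- ===== PRECONDITION & SPEC =====
def Spec_perlmutter_task_resources (num_procs : Int) (num_nodes : Int) (out : Int × Int × Int) : Prop := out = perlmutter_task_resources_alt num_procs num_nodes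
instance (num_procs : Int) (num_nodes : Int) (out : Int × Int × Int) : Decidable (Spec_perlmutter_task_resources num_procs num_nodes out) := by unfold Spec_perlmutter_task_resources; infer_instance

-- ===== CLAIM (what is proved, stated in full; the proofs are below) =====
def Claim_equal_perlmutter_task_resources : Prop := ∀ (num_procs : Int) (num_nodes : Int), Dom_perlmutter_task_resources num_procs num_nodes → Spec_perlmutter_task_resources num_procs num_nodes (perlmutter_task_resources num_procs num_nodes)

-- ===== LEMMAS AND PROOFS =====

-- The two tables, evaluated once as literals.
def pvT : List Int := [1, 4, 9, 16, 25, 36, 49, 64, 81, 100, 121, 256, 1024, 2304, 4096, 6400, 9216, 12544, 16384, 20736, 25600, 30976, 36864, 43264, 50176, 57600, 65536, 73984, 82944, 92416, 102400, 112896, 123904, 135424, 147456, 160000, 173056, 186624, 200704, 215296, 230400, 246016]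
def pvN : List Int := [1, 1, 1, 1, 1, 1, 1, 1, 1, 1, 1, 2, 8, 18, 32, 50, 72, 98, 128, 162, 200, 242, 288, 338, 392, 450, 512, 578, 648, 722, 800, 882, 968, 1058, 1152, 1250, 1352, 1458, 1568, 1682, 1800, 1922]

set_option maxRecDepth 40000 in
theorem tblA_eq :
    (((PySem.List.pyRange 1 12 1).map (fun p => p ^ 2)) ++
      (((PySem.List.pyRange 1 512 1).filter (fun p => PySem.Int.mod (p ^ 2) 128 == 0)).map (fun p => p ^ 2))) = pvT := by
  decide

set_option maxRecDepth 10000 in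
theorem tblB_eq :
    (((PySem.List.pyRange 1 12 1).map (fun p => p * p)) ++
      ((PySem.List.pyRange 1 32 1).map (fun k => (16 * k) ^ 2))) = pvT := by
  decide

theorem node_eq : pvT.map (fun P => max (PySem.Int.floordiv P 128) 1) = pvN := by decide

theorem sorted_T : List.Pairwise (· ≤ ·) pvT := by decide
theorem sorted_N : List.Pairwise (· ≤ ·) pvN := by decide

-- A's loop returns the first index whose entry is ≥ key, clamped to the last index.
theorem pvFirstGeIdx_eq (key : Int) :
    ∀ (xs : List Int) (i : Nat), xs ≠ [] →
      pvFirstGeIdx key xs i = i + min (List.findIdx (fun x => decide (key ≤ x)) xs) (xs.length - 1) := by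
  intro xs
  induction xs with
  | nil => simp
  | cons x rest ih =>
    intro i _
    by_cases hk : key ≤ x
    · simp [pvFirstGeIdx, hk, List.findIdx_cons]
    · cases rest with
      | nil => simp [pvFirstGeIdx, hk, List.findIdx_cons]
      | cons y t =>
        have hstep : pvFirstGeIdx key (x :: y :: t) i = pvFirstGeIdx key (y :: t) (i + 1) := by
          rw [pvFirstGeIdx, if_neg hk]
        rw [hstep, ih (i + 1) (by simp),
          List.findIdx_cons (p := fun x => decide (key ≤ x)) (b := x)]
        simp only [decide_eq_false hk, cond_false, List.length_cons]
        omega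

-- Binary search on a sorted list returns the same clamped first-≥ index.
theorem pvBSearch_eq (xs : List Int) (key : Int) (hs : List.Pairwise (· ≤ ·) xs)
    (t : Nat) (ht : t = min (List.findIdx (fun x => decide (key ≤ x)) xs) (xs.length - 1)) :
    ∀ (n lo hi : Nat), hi - lo ≤ n → hi < xs.length → lo ≤ t → t ≤ hi →
      pvBSearch xs key lo hi = t := by
  have hmono : ∀ (i j : Nat) (_ : i ≤ j) (hj : j < xs.length), xs[i]'(by omega) ≤ xs[j] := by
    intro i j hij hj
    rcases Nat.lt_or_ge i j with h | h
    · exact (List.pairwise_iff_getElem.mp hs) i j (by omega) hj h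
    · have : i = j := by omega
      subst this; exact le_refl _
  intro n
  induction n with
  | zero =>
    intro lo hi h1 h2 h3 h4
    have : lo = hi := by omega
    rw [pvBSearch, dif_neg (by omega)]
    omega
  | succ n ih =>
    intro lo hi h1 h2 h3 h4
    by_cases hlh : lo < hi
    · rw [pvBSearch, dif_pos hlh]
      have hm1 : lo ≤ (lo + hi) / 2 := by omega
      have hm2 : (lo + hi) / 2 < hi := by omega
      have hmlen : (lo + hi) / 2 < xs.length := by omega
      rw [List.getD_eq_getElem xs 0 hmlen]

      by_cases hc : xs[(lo + hi) / 2] < key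
      · rw [if_pos hc]
        have hfi : (lo + hi) / 2 < List.findIdx (fun x => decide (key ≤ x)) xs := by
          rw [List.lt_findIdx_iff]
          refine ⟨hmlen, ?_⟩
          intro j hj
          have := hmono j ((lo + hi) / 2) hj hmlen
          simp only [decide_eq_false_iff_not]
          omega
        exact ih ((lo + hi) / 2 + 1) hi (by omega) h2 (by omega) h4
      · rw [if_neg hc]
        have hfi : List.findIdx (fun x => decide (key ≤ x)) xs ≤ (lo + hi) / 2 := by
          by_contra hcon
          have := List.not_of_lt_findIdx (p := fun x => decide (key ≤ x)) (xs := xs)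
            (i := (lo + hi) / 2) (by omega)
          simp only [decide_eq_false_iff_not] at this
          omega
        exact ih lo ((lo + hi) / 2) (by omega) (by omega) h3 (by omega)
    · rw [pvBSearch, dif_neg hlh]
      omega

theorem lenN : pvN.length - 1 = 41 := by decide
theorem lenT : pvT.length - 1 = 41 := by decide

theorem idx_T (key : Int) : pvFirstGeIdx key pvT 0 = pvBSearch pvT key 0 41 := by
  rw [pvFirstGeIdx_eq key pvT 0 (by decide),
    pvBSearch_eq pvT key sorted_T _ rfl 41 0 41 (by omega) (by decide) (Nat.zero_le _)
      (le_trans (Nat.min_le_right _ _) (le_of_eq lenT))]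
  omega

theorem idx_N (key : Int) : pvFirstGeIdx key pvN 0 = pvBSearch pvN key 0 41 := by
  rw [pvFirstGeIdx_eq key pvN 0 (by decide),
    pvBSearch_eq pvN key sorted_N _ rfl 41 0 41 (by omega) (by decide) (Nat.zero_le _)
      (le_trans (Nat.min_le_right _ _) (le_of_eq lenN))]
  omega

-- ===== VERDICT (by name: the statement is the Claim_ definition above) =====
theorem perlmutter_task_resources_spec : Claim_equal_perlmutter_task_resources := by
  intro p n _
  show perlmutter_task_resources p n = perlmutter_task_resources_alt p n
  unfold perlmutter_task_resources perlmutter_task_resources_alt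
  simp only [tblA_eq, tblB_eq, node_eq]
  by_cases h : n > 1
  · simp [h, lenN, idx_N]
  · simp [h, lenT, idx_T]
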